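-- pv_equiv track=rewrite | github.com/malittlevina/unimind | core/memory_reasoning_integration.py | _identify_reasoning_requirements
-- ===== SOURCE A (Python) =====
-- from typing import Dict, List, Any, Optional, Tuple, Union
--
-- def _identify_reasoning_requirements(query: str) -> List[str]:
--     """Identify reasoning requirements for the query."""
--     requirements = []
--
--     # Check for deductive reasoning needs
--     if any(word in query.lower() for word in ["therefore", "thus", "consequently", "logically"]):
--         requirements.append("deductive_reasoning")
--
--     # Check for inductive reasoning needs
--     if any(word in query.lower() for word in ["pattern", "trend", "generalize", "usually"]):
--         requirements.append("inductive_reasoning")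
--
--     # Check for abductive reasoning needs
--     if any(word in query.lower() for word in ["explain", "why", "cause", "reason"]):
--         requirements.append("abductive_reasoning")
--
--     # Check for creative reasoning needs
--     if any(word in query.lower() for word in ["create", "invent", "design", "novel"]):
--         requirements.append("creative_reasoning")
--
--     # Check for critical reasoning needs
--     if any(word in query.lower() for word in ["evaluate", "assess", "criticize", "analyze"]):
--         requirements.append("critical_reasoning")
--
--     return requirements
-- ===== SOURCE B (Python) =====
-- _WORD_LABELS = [
--     ("therefore", "deductive_reasoning"), ("thus", "deductive_reasoning"),
--     ("consequently", "deductive_reasoning"), ("logically", "deductive_reasoning"),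
--     ("pattern", "inductive_reasoning"), ("trend", "inductive_reasoning"),
--     ("generalize", "inductive_reasoning"), ("usually", "inductive_reasoning"),
--     ("explain", "abductive_reasoning"), ("why", "abductive_reasoning"),
--     ("cause", "abductive_reasoning"), ("reason", "abductive_reasoning"),
--     ("create", "creative_reasoning"), ("invent", "creative_reasoning"),
--     ("design", "creative_reasoning"), ("novel", "creative_reasoning"),
--     ("evaluate", "critical_reasoning"), ("assess", "critical_reasoning"),
--     ("criticize", "critical_reasoning"), ("analyze", "critical_reasoning"),
-- ]
-- _ORDER = ["deductive_reasoning", "inductive_reasoning", "abductive_reasoning",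
--           "creative_reasoning", "critical_reasoning"]
--
--
-- def _identify_reasoning_requirements(query: str):
--     """Identify reasoning requirements for the query.
--
--     Single left-to-right scan of the lowercased query: at each position,
--     record the label of every keyword that starts there; finally emit the
--     matched labels in canonical order.  Substring semantics is preserved
--     because a keyword occurs as a substring iff it starts at some position.
--     """
--     q = query.lower()
--     matched = set()
--     for i in range(len(q)):
--         for word, label in _WORD_LABELS:
--             if q.startswith(word, i):
--                 matched.add(label)
--     return [label for label in _ORDER if label in matched]
-- ===== Notes on version B (the rewrite author's own statement) =====
-- stated objective: alternative
-- what changed: Replaces A's five per-group any(substring-in) membership checks by a single left-to-right scan over the lowercased query that tests which keywords start at each position, accumulating matched labels in a set, then emits the labels in canonical order.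
import Mathlib
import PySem

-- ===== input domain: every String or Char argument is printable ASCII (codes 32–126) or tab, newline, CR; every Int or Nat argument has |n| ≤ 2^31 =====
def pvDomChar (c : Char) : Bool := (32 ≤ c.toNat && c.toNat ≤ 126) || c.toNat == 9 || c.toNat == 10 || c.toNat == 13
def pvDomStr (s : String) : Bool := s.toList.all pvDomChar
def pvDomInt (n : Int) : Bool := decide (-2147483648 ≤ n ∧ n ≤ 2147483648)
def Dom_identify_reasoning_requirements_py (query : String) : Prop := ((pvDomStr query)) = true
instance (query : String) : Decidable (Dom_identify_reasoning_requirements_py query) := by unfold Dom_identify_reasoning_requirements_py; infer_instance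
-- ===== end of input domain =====

-- B replaces A's five per-group substring-membership checks by a single scan over the text positions collecting matched labels in a set, then emits them in canonical order (alternative, same cost).


-- ===== PORT A =====
def identify_reasoning_requirements_py (query : String) : List String :=
  let requirements : List String := []
  let requirements := if ["therefore", "thus", "consequently", "logically"].any
      (fun w => PySem.Str.isIn w (PySem.Str.lower query)) then requirements ++ ["deductive_reasoning"] else requirements
  let requirements := if ["pattern", "trend", "generalize", "usually"].any
      (fun w => PySem.Str.isIn w (PySem.Str.lower query)) then requirements ++ ["inductive_reasoning"] else requirements
  let requirements := if ["explain", "why", "cause", "reason"].any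
      (fun w => PySem.Str.isIn w (PySem.Str.lower query)) then requirements ++ ["abductive_reasoning"] else requirements
  let requirements := if ["create", "invent", "design", "novel"].any
      (fun w => PySem.Str.isIn w (PySem.Str.lower query)) then requirements ++ ["creative_reasoning"] else requirements
  let requirements := if ["evaluate", "assess", "criticize", "analyze"].any
      (fun w => PySem.Str.isIn w (PySem.Str.lower query)) then requirements ++ ["critical_reasoning"] else requirements
  requirements

-- ===== PORT B =====
-- the module-level tables _WORD_LABELS and _ORDER of Source B (keywords as char lists)
def pvWordLabels : List (List Char × String) :=
  [("therefore".toList, "deductive_reasoning"), ("thus".toList, "deductive_reasoning"),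
   ("consequently".toList, "deductive_reasoning"), ("logically".toList, "deductive_reasoning"),
   ("pattern".toList, "inductive_reasoning"), ("trend".toList, "inductive_reasoning"),
   ("generalize".toList, "inductive_reasoning"), ("usually".toList, "inductive_reasoning"),
   ("explain".toList, "abductive_reasoning"), ("why".toList, "abductive_reasoning"),
   ("cause".toList, "abductive_reasoning"), ("reason".toList, "abductive_reasoning"),
   ("create".toList, "creative_reasoning"), ("invent".toList, "creative_reasoning"),
   ("design".toList, "creative_reasoning"), ("novel".toList, "creative_reasoning"),
   ("evaluate".toList, "critical_reasoning"), ("assess".toList, "critical_reasoning"),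
   ("criticize".toList, "critical_reasoning"), ("analyze".toList, "critical_reasoning")]

def pvOrder : List String :=
  ["deductive_reasoning", "inductive_reasoning", "abductive_reasoning",
   "creative_reasoning", "critical_reasoning"]

-- the scan loop of Source B: for i in range(len(q)): for word, label in _WORD_LABELS:
--   if q.startswith(word, i): matched.add(label)    (q.startswith(word, i) is exactly word <+: q.drop i)
def pvMatched (q : List Char) : PySem.Set String :=
  (List.range q.length).foldl
    (fun m i => pvWordLabels.foldl
      (fun m p => if p.1.isPrefixOf (q.drop i) then PySem.Set.add m p.2 else m) m)
    PySem.Set.empty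

def identify_reasoning_requirements_py_alt (query : String) : List String :=
  let q := (PySem.Str.lower query).toList
  let matched := pvMatched q
  pvOrder.filter (fun lab => PySem.Set.contains matched lab)

-- ===== PRECONDITION & SPEC =====
def Spec_identify_reasoning_requirements_py (query : String) (out : List String) : Prop := out = identify_reasoning_requirements_py_alt query
instance (query : String) (out : List String) : Decidable (Spec_identify_reasoning_requirements_py query out) := by unfold Spec_identify_reasoning_requirements_py; infer_instance

-- ===== CLAIM (what is proved, stated in full; the proofs are below) =====
def Claim_equal_identify_reasoning_requirements_py : Prop := ∀ (query : String), Dom_identify_reasoning_requirements_py query → Spec_identify_reasoning_requirements_py query (identify_reasoning_requirements_py query)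

-- ===== LEMMAS AND PROOFS =====

-- membership after the inner fold over the keyword table
theorem pv_mem_inner (l : List (List Char × String)) (q : List Char) (i : Nat)
    (m : PySem.Set String) (x : String) :
    x ∈ l.foldl (fun m p => if p.1.isPrefixOf (q.drop i) then PySem.Set.add m p.2 else m) m ↔
      x ∈ m ∨ ∃ p ∈ l, p.1.isPrefixOf (q.drop i) ∧ p.2 = x := by
  induction l generalizing m with
  | nil => simp
  | cons hd tl ih =>
    simp only [List.foldl_cons, List.mem_cons, ih]
    split
    · rename_i h
      rw [PySem.Set.mem_add]
      constructor
      · rintro ((hm | hx) | hex)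
        · exact Or.inl hm
        · exact Or.inr ⟨hd, Or.inl rfl, h, hx.symm⟩
        · obtain ⟨p, hp, hc⟩ := hex
          exact Or.inr ⟨p, Or.inr hp, hc⟩
      · rintro (hm | ⟨p, (rfl | hp), hc⟩)
        · exact Or.inl (Or.inl hm)
        · exact Or.inl (Or.inr hc.2.symm)
        · exact Or.inr ⟨p, hp, hc⟩
    · rename_i h
      constructor
      · rintro (hm | hex)
        · exact Or.inl hm
        · obtain ⟨p, hp, hc⟩ := hex
          exact Or.inr ⟨p, Or.inr hp, hc⟩
      · rintro (hm | ⟨p, (rfl | hp), hc⟩)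
        · exact Or.inl hm
        · exact absurd hc.1 (by simp [h])
        · exact Or.inr ⟨p, hp, hc⟩

-- membership after the outer fold over the positions
theorem pv_mem_outer (ns : List Nat) (q : List Char) (m : PySem.Set String) (x : String) :
    x ∈ ns.foldl
        (fun m i => pvWordLabels.foldl
          (fun m p => if p.1.isPrefixOf (q.drop i) then PySem.Set.add m p.2 else m) m) m ↔
      x ∈ m ∨ ∃ i ∈ ns, ∃ p ∈ pvWordLabels, p.1.isPrefixOf (q.drop i) ∧ p.2 = x := by
  induction ns generalizing m with
  | nil => simp
  | cons hd tl ih =>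
    simp only [List.foldl_cons, List.mem_cons, ih, pv_mem_inner]
    constructor
    · rintro ((hm | hex) | ⟨i, hi, hp⟩)
      · exact Or.inl hm
      · exact Or.inr ⟨hd, Or.inl rfl, hex⟩
      · exact Or.inr ⟨i, Or.inr hi, hp⟩
    · rintro (hm | ⟨i, (rfl | hi), hp⟩)
      · exact Or.inl (Or.inl hm)
      · exact Or.inl (Or.inr hp)
      · exact Or.inr ⟨i, hi, hp⟩

-- a nonempty keyword occurs starting at some scanned position iff it is a substring
theorem pv_exists_range_prefix_iff (w q : List Char) (hw : w ≠ []) :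
    (∃ i ∈ List.range q.length, w.isPrefixOf (q.drop i)) ↔ PySem.Chars.isIn w q = true := by
  rw [← PySem.Chars.exists_prefix_drop_iff_isIn]
  constructor
  · rintro ⟨i, _, h⟩
    exact ⟨i, List.isPrefixOf_iff_prefix.mp h⟩
  · rintro ⟨j, h⟩
    by_cases hj : j < q.length
    · exact ⟨j, List.mem_range.mpr hj, List.isPrefixOf_iff_prefix.mpr h⟩
    · exfalso
      rw [List.drop_eq_nil_of_le (by omega)] at h
      exact hw (List.prefix_nil.mp h)

-- full characterisation of the matched set
theorem pv_mem_matched (q : List Char) (x : String) :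
    x ∈ pvMatched q ↔ ∃ p ∈ pvWordLabels, PySem.Chars.isIn p.1 q = true ∧ p.2 = x := by
  unfold pvMatched
  rw [pv_mem_outer]
  constructor
  · rintro (hm | ⟨i, hi, p, hp, hpre, hx⟩)
    · simp [PySem.Set.empty] at hm
    · have hw : p.1 ≠ [] := by
        revert hp; unfold pvWordLabels; intro hp
        simp only [List.mem_cons, List.not_mem_nil, or_false] at hp
        rcases hp with h|h|h|h|h|h|h|h|h|h|h|h|h|h|h|h|h|h|h|h <;> subst h <;> decide
      exact ⟨p, hp, (pv_exists_range_prefix_iff p.1 q hw).mp ⟨i, hi, hpre⟩, hx⟩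
  · rintro ⟨p, hp, hin, hx⟩
    have hw : p.1 ≠ [] := by
      intro h
      rw [h] at hin
      -- empty keyword: impossible in the table, but also harmless; derive from table membership
      revert hp; unfold pvWordLabels; intro hp
      simp only [List.mem_cons, List.not_mem_nil, or_false] at hp
      rcases hp with h'|h'|h'|h'|h'|h'|h'|h'|h'|h'|h'|h'|h'|h'|h'|h'|h'|h'|h'|h' <;>
        simp [h'] at h
    obtain ⟨i, hi, hpre⟩ := (pv_exists_range_prefix_iff p.1 q hw).mpr hin
    exact Or.inr ⟨i, hi, p, hp, hpre, hx⟩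

-- ===== VERDICT (by name: the statement is the Claim_ definition above) =====
theorem identify_reasoning_requirements_py_spec : Claim_equal_identify_reasoning_requirements_py := by
  intro query _
  unfold Spec_identify_reasoning_requirements_py identify_reasoning_requirements_py identify_reasoning_requirements_py_alt
  have h1 : (pvMatched (PySem.Str.lower query).toList).contains "deductive_reasoning" = (["therefore", "thus", "consequently", "logically"].any fun w => PySem.Str.isIn w (PySem.Str.lower query)) := by
    rw [Bool.eq_iff_iff]
    simp [pv_mem_matched, pvWordLabels, PySem.Str.isIn_eq]
  have h2 : (pvMatched (PySem.Str.lower query).toList).contains "inductive_reasoning" = (["pattern", "trend", "generalize", "usually"].any fun w => PySem.Str.isIn w (PySem.Str.lower query)) := by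
    rw [Bool.eq_iff_iff]
    simp [pv_mem_matched, pvWordLabels, PySem.Str.isIn_eq]
  have h3 : (pvMatched (PySem.Str.lower query).toList).contains "abductive_reasoning" = (["explain", "why", "cause", "reason"].any fun w => PySem.Str.isIn w (PySem.Str.lower query)) := by
    rw [Bool.eq_iff_iff]
    simp [pv_mem_matched, pvWordLabels, PySem.Str.isIn_eq]
  have h4 : (pvMatched (PySem.Str.lower query).toList).contains "creative_reasoning" = (["create", "invent", "design", "novel"].any fun w => PySem.Str.isIn w (PySem.Str.lower query)) := by
    rw [Bool.eq_iff_iff]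
    simp [pv_mem_matched, pvWordLabels, PySem.Str.isIn_eq]
  have h5 : (pvMatched (PySem.Str.lower query).toList).contains "critical_reasoning" = (["evaluate", "assess", "criticize", "analyze"].any fun w => PySem.Str.isIn w (PySem.Str.lower query)) := by
    rw [Bool.eq_iff_iff]
    simp [pv_mem_matched, pvWordLabels, PySem.Str.isIn_eq]
  simp only [pvOrder, List.filter_cons, List.filter_nil, h1, h2, h3, h4, h5]
  split_ifs <;> rfl
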